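-- pv_equiv track=rewrite | github.com/Rinkyshu200/resume-matcher | ResumeMatchAI/utils/skill_extractor.py | _are_skills_similar
-- ===== SOURCE A (Python) =====
-- def _are_skills_similar(skill1: str, skill2: str) -> bool:
--     """
--     Check if two skills are similar (fuzzy matching).
--
--     Args:
--         skill1: First skill
--         skill2: Second skill
--
--     Returns:
--         True if skills are similar, False otherwise
--     """
--     # Check if one skill contains the other
--     if skill1 in skill2 or skill2 in skill1:
--         return True
--
--     # Check for common abbreviations and variations
--     skill_variations = {
--         'javascript': ['js', 'ecmascript'],
--         'python': ['py'],
--         'machine learning': ['ml'],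
--         'artificial intelligence': ['ai'],
--         'database': ['db'],
--         'sql server': ['mssql', 'microsoft sql'],
--         'postgresql': ['postgres'],
--         'amazon web services': ['aws'],
--         'google cloud platform': ['gcp'],
--         'microsoft azure': ['azure'],
--     }
--
--     for base_skill, variations in skill_variations.items():
--         if (skill1 == base_skill and skill2 in variations) or \
--            (skill2 == base_skill and skill1 in variations) or \
--            (skill1 in variations and skill2 in variations):
--             return True
--
--     return False
-- ===== SOURCE B (Python) =====
-- # Flat term -> group-id dictionary literal; similarity is one boolean expression:
-- # substring containment or both terms present in the index with the same group id.
-- _CANON = {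
--     'javascript': 0, 'js': 0, 'ecmascript': 0,
--     'python': 1, 'py': 1,
--     'machine learning': 2, 'ml': 2,
--     'artificial intelligence': 3, 'ai': 3,
--     'database': 4, 'db': 4,
--     'sql server': 5, 'mssql': 5, 'microsoft sql': 5,
--     'postgresql': 6, 'postgres': 6,
--     'amazon web services': 7, 'aws': 7,
--     'google cloud platform': 8, 'gcp': 8,
--     'microsoft azure': 9, 'azure': 9,
-- }
--
--
-- def _are_skills_similar(skill1: str, skill2: str) -> bool:
--     g1 = _CANON.get(skill1)
--     return (skill1 in skill2 or skill2 in skill1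
--             or (g1 is not None and g1 == _CANON.get(skill2)))
-- ===== Notes on version B (the rewrite author's own statement) =====
-- stated objective: idiomatic
-- what changed: Replaces A's per-call scan over (base, variations) pairs with three-way conditions by a flat term-to-group-id dictionary literal; the result is a single boolean expression: substring containment or both skills found with equal group ids.
import Mathlib
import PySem

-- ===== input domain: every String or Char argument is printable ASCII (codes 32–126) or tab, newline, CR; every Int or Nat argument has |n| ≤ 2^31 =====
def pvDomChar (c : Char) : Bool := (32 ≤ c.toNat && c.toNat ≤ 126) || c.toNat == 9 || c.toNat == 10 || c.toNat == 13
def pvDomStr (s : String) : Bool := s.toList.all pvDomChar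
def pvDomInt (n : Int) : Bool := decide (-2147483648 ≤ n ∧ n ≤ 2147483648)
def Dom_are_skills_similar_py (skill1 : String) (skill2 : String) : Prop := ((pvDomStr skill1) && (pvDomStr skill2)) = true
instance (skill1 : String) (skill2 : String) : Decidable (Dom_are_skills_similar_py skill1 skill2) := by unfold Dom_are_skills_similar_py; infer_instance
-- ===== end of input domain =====

-- B replaces A's per-call three-way scan over the (base, variations) table by a flat
-- term→group-id dictionary literal; similarity is one boolean expression: substring
-- containment, or both skills present in the index with equal group ids (idiomatic).

-- ===== PORT A =====
def skillVariationsA : List (String × List String) := [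
  ("javascript", ["js", "ecmascript"]),
  ("python", ["py"]),
  ("machine learning", ["ml"]),
  ("artificial intelligence", ["ai"]),
  ("database", ["db"]),
  ("sql server", ["mssql", "microsoft sql"]),
  ("postgresql", ["postgres"]),
  ("amazon web services", ["aws"]),
  ("google cloud platform", ["gcp"]),
  ("microsoft azure", ["azure"])]

def are_skills_similar_py (skill1 : String) (skill2 : String) : Bool :=
  if PySem.Str.isIn skill1 skill2 || PySem.Str.isIn skill2 skill1 then true
  else if skillVariationsA.any (fun p =>
      (skill1 == p.1 && p.2.contains skill2) ||
      (skill2 == p.1 && p.2.contains skill1) ||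
      (p.2.contains skill1 && p.2.contains skill2)) then true
  else false

-- ===== PORT B =====
-- the flat dict literal of Source B (term -> group id)
def canonB : PySem.Dict String Int := PySem.Dict.mk
  [("javascript", 0), ("js", 0), ("ecmascript", 0),
   ("python", 1), ("py", 1),
   ("machine learning", 2), ("ml", 2),
   ("artificial intelligence", 3), ("ai", 3),
   ("database", 4), ("db", 4),
   ("sql server", 5), ("mssql", 5), ("microsoft sql", 5),
   ("postgresql", 6), ("postgres", 6),
   ("amazon web services", 7), ("aws", 7),
   ("google cloud platform", 8), ("gcp", 8),
   ("microsoft azure", 9), ("azure", 9)]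

def are_skills_similar_py_alt (skill1 : String) (skill2 : String) : Bool :=
  let g1 := canonB.get? skill1
  PySem.Str.isIn skill1 skill2 || PySem.Str.isIn skill2 skill1 ||
    (g1.isSome && g1 == canonB.get? skill2)

-- ===== PRECONDITION & SPEC =====
def Spec_are_skills_similar_py (skill1 : String) (skill2 : String) (out : Bool) : Prop := out = are_skills_similar_py_alt skill1 skill2
instance (skill1 : String) (skill2 : String) (out : Bool) : Decidable (Spec_are_skills_similar_py skill1 skill2 out) := by unfold Spec_are_skills_similar_py; infer_instance

-- ===== CLAIM (what is proved, stated in full; the proofs are below) =====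
def Claim_equal_are_skills_similar_py : Prop := ∀ (skill1 : String) (skill2 : String), Dom_are_skills_similar_py skill1 skill2 → Spec_are_skills_similar_py skill1 skill2 (are_skills_similar_py skill1 skill2)

-- ===== LEMMAS AND PROOFS =====

def allTerms : List String :=
  ["javascript", "js", "ecmascript", "python", "py", "machine learning", "ml",
   "artificial intelligence", "ai", "database", "db", "sql server", "mssql",
   "microsoft sql", "postgresql", "postgres", "amazon web services", "aws",
   "google cloud platform", "gcp", "microsoft azure", "azure"]

set_option maxHeartbeats 1000000 in
theorem loop_false_left (s1 s2 : String) (h : s1 ∉ allTerms) :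
    (skillVariationsA.any (fun p =>
      (s1 == p.1 && p.2.contains s2) ||
      (s2 == p.1 && p.2.contains s1) ||
      (p.2.contains s1 && p.2.contains s2))) = false := by
  simp [allTerms] at h
  simp [skillVariationsA]
  tauto

set_option maxHeartbeats 2000000 in
theorem loop_false_right (s1 s2 : String) (h : s2 ∉ allTerms) :
    (skillVariationsA.any (fun p =>
      (s1 == p.1 && p.2.contains s2) ||
      (s2 == p.1 && p.2.contains s1) ||
      (p.2.contains s1 && p.2.contains s2))) = false := by
  simp [allTerms] at h
  simp [skillVariationsA]
  tauto

set_option maxHeartbeats 1000000 in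
theorem get?_none (s : String) (h : s ∉ allTerms) : canonB.get? s = none := by
  simp [allTerms] at h
  rw [canonB, PySem.Dict.get?_eq_none_iff_not_mem_keys]
  simpa using h

set_option maxHeartbeats 4000000 in
set_option maxRecDepth 4000 in
theorem loop_eq_lookup (s1 s2 : String) (hne : s1 ≠ s2) :
    (skillVariationsA.any (fun p =>
      (s1 == p.1 && p.2.contains s2) ||
      (s2 == p.1 && p.2.contains s1) ||
      (p.2.contains s1 && p.2.contains s2))) =
    ((canonB.get? s1).isSome && canonB.get? s1 == canonB.get? s2) := by
  by_cases h1 : s1 ∈ allTerms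
  · by_cases h2 : s2 ∈ allTerms
    · simp only [allTerms, List.mem_cons, List.not_mem_nil, or_false] at h1 h2
      rcases h1 with rfl|rfl|rfl|rfl|rfl|rfl|rfl|rfl|rfl|rfl|rfl|rfl|rfl|rfl|rfl|rfl|rfl|rfl|rfl|rfl|rfl|rfl <;>
        rcases h2 with rfl|rfl|rfl|rfl|rfl|rfl|rfl|rfl|rfl|rfl|rfl|rfl|rfl|rfl|rfl|rfl|rfl|rfl|rfl|rfl|rfl|rfl <;>
        revert hne <;> decide
    · rw [loop_false_right s1 s2 h2, get?_none s2 h2]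
      cases hg : canonB.get? s1 <;> simp [hg]
  · rw [loop_false_left s1 s2 h1, get?_none s1 h1]
    rfl

-- ===== VERDICT (by name: the statement is the Claim_ definition above) =====
theorem are_skills_similar_py_spec : Claim_equal_are_skills_similar_py := by
  intro s1 s2 _
  unfold Spec_are_skills_similar_py are_skills_similar_py are_skills_similar_py_alt
  by_cases h : (PySem.Str.isIn s1 s2 || PySem.Str.isIn s2 s1) = true
  · simp only [h, if_true, Bool.true_or]
  · have hne : s1 ≠ s2 := by
      intro he
      apply h
      subst he
      have hs : PySem.Chars.isIn s1.toList s1.toList = true := by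
        rw [PySem.Chars.isIn_iff_infix]
      simp [hs]
    rw [if_neg h]
    simp only [Bool.or_eq_true, not_or] at h
    simp only [PySem.Str.isIn] at *
    rw [← loop_eq_lookup s1 s2 hne]
    cases skillVariationsA.any (fun p =>
      (s1 == p.1 && p.2.contains s2) ||
      (s2 == p.1 && p.2.contains s1) ||
      (p.2.contains s1 && p.2.contains s2)) <;>
      simp [h.1, h.2]
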